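-- pv_equiv track=rewrite | github.com/KuroKousuii/Codeforces | Python/800 - IV/1560A.py | check
-- ===== SOURCE A (Python) =====
-- def check(n):
--     if n % 10 == 3:
--         return False
--     cur = 0
--     while n:
--         cur += n % 10
--         n //= 10
--     return True if cur % 3 else False
-- ===== SOURCE B (Python) =====
-- def check(n):
--     # closed form: digit sum mod 3 equals n mod 3
--     return n % 10 != 3 and n % 3 != 0
-- ===== Notes on version B (the rewrite author's own statement) =====
-- stated objective: faster
-- what changed: Replaced the digit-summing while loop by the closed-form test n % 10 != 3 and n % 3 != 0 (the digit sum is congruent to n mod 3).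
import Mathlib
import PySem

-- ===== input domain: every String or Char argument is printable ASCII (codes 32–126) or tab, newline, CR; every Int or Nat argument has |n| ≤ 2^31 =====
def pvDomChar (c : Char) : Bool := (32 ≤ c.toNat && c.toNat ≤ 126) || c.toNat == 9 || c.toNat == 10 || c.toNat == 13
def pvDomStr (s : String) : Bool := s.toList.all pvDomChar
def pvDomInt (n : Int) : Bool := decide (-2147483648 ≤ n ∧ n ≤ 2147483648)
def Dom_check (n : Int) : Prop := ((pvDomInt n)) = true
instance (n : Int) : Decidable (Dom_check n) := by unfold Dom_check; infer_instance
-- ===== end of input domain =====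

-- B replaces A's digit-sum loop with the closed form n % 10 != 3 and n % 3 != 0 (faster: O(1) vs O(log n)).
-- ===== PORT A =====
-- A's while loop: cur += n % 10; n //= 10 (terminates for n > 0; for negative n Python loops forever — outside Pre_)
def checkSumLoop (cur : Int) (n : Int) : Int :=
  if _h : 0 < n then
    checkSumLoop (cur + PySem.Int.mod n 10) (PySem.Int.floordiv n 10)
  else cur
termination_by n.toNat
decreasing_by
  have : PySem.Int.floordiv n 10 = n / 10 := PySem.Int.floordiv_eq_ediv_of_pos (by omega)
  rw [this]; omega

def check (n : Int) : Bool :=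
  if PySem.Int.mod n 10 = 3 then false
  else
    let cur := checkSumLoop 0 n
    if PySem.Int.mod cur 3 ≠ 0 then true else false

-- ===== PORT B =====
def check_alt (n : Int) : Bool :=
  PySem.Int.mod n 10 ≠ 3 && PySem.Int.mod n 3 ≠ 0

-- ===== PRECONDITION & SPEC =====
-- Pre_ excludes exactly the negative n whose Python last digit is not 3: there A's while loop never terminates (no input on which A returns is excluded).
def Pre_check (n : Int) : Prop := 0 ≤ n ∨ PySem.Int.mod n 10 = 3
instance (n : Int) : Decidable (Pre_check n) := by unfold Pre_check; infer_instance
def pvWitness_check : Int := 7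

def Spec_check (n : Int) (out : Bool) : Prop := out = check_alt n
instance (n : Int) (out : Bool) : Decidable (Spec_check n out) := by unfold Spec_check; infer_instance

-- ===== CLAIM (what is proved, stated in full; the proofs are below) =====
def Claim_equal_check : Prop := ∀ (n : Int), Dom_check n → Pre_check n → Spec_check n (check n)

-- ===== LEMMAS AND PROOFS =====
-- The loop's digit sum is congruent to cur + n modulo 3 (for 0 ≤ n).
theorem checkSumLoop_mod3 (cur n : Int) (hn : 0 ≤ n) :
    PySem.Int.mod (checkSumLoop cur n) 3 = PySem.Int.mod (cur + n) 3 := by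
  rw [checkSumLoop]
  split_ifs with h
  · have h10 : PySem.Int.floordiv n 10 = n / 10 := PySem.Int.floordiv_eq_ediv_of_pos (by omega)
    have hm10 : PySem.Int.mod n 10 = n % 10 := PySem.Int.mod_eq_emod_of_pos (by omega)
    rw [h10, hm10, checkSumLoop_mod3 _ _ (by omega),
        PySem.Int.mod_eq_emod_of_pos (a := cur + n % 10 + n / 10) (by omega),
        PySem.Int.mod_eq_emod_of_pos (a := cur + n) (by omega)]
    omega
  · have : n = 0 := by omega
    rw [this, add_zero]
termination_by n.toNat
decreasing_by omega

-- ===== VERDICT (by name: the statement is the Claim_ definition above) =====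
theorem check_spec : Claim_equal_check := by
  intro n _ hpre
  unfold Spec_check check check_alt
  have hm10 : PySem.Int.mod n 10 = n % 10 := PySem.Int.mod_eq_emod_of_pos (by omega)
  have hm3 : PySem.Int.mod n 3 = n % 3 := PySem.Int.mod_eq_emod_of_pos (by omega)
  by_cases h3 : PySem.Int.mod n 10 = 3
  · simp [hm10.symm.trans h3]
  · have hn : 0 ≤ n := hpre.resolve_right h3
    have hloop := checkSumLoop_mod3 0 n hn
    rw [zero_add] at hloop
    simp only [hloop, hm3, hm10]
    have h3' : ¬ n % 10 = 3 := by rw [hm10] at h3; exact h3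
    by_cases hz : n % 3 = 0 <;> simp [hz, h3']
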